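-- pv_equiv track=rewrite | github.com/OpenCyphal/pycyphal | pyuavcan/util/_mark_last.py | mark_last
-- ===== SOURCE A (Python) =====
-- import typing
--
-- T = typing.TypeVar("T")
--
-- def mark_last(it: typing.Iterable[T]) -> typing.Iterable[typing.Tuple[bool, T]]:
--     """
--     This is an iteration helper like :func:`enumerate`. It amends every item with a boolean flag which is False
--     for all items except the last one. If the input iterable is empty, yields nothing.
--
--     >>> list(mark_last([]))
--     []
--     >>> list(mark_last([123]))
--     [(True, 123)]
--     >>> list(mark_last([123, 456]))
--     [(False, 123), (True, 456)]
--     >>> list(mark_last([123, 456, 789]))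
--     [(False, 123), (False, 456), (True, 789)]
--     """
--     it = iter(it)
--     try:
--         last = next(it)
--     except StopIteration:
--         pass
--     else:
--         for val in it:
--             yield False, last
--             last = val
--         yield True, last
-- ===== SOURCE B (Python) =====
-- import typing
--
-- T = typing.TypeVar("T")
--
-- def mark_last(it: typing.Iterable[T]) -> typing.Iterable[typing.Tuple[bool, T]]:
--     items = list(it)
--     n = len(items)
--     for i, val in enumerate(items):
--         yield i == n - 1, val
-- ===== Notes on version B (the rewrite author's own statement) =====
-- stated objective: alternative
-- what changed: B materializes the iterable into a list and flags the last item by comparing each enumerate index with len-1, replacing A's streaming one-element lookahead buffer.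
import Mathlib
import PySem

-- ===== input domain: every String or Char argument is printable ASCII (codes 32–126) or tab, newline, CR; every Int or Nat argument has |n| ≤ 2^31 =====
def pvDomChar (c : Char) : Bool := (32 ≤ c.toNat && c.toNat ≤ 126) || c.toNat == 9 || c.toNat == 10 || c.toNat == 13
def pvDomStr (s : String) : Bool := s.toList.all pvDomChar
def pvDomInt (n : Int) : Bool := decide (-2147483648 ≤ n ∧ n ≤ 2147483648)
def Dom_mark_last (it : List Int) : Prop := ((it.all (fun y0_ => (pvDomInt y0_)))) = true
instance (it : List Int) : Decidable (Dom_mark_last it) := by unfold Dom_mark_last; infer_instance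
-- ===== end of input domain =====

-- B replaces A's streaming one-element lookahead buffer by materializing the list and
-- comparing each enumerate index with len-1 (alternative decomposition, same cost).

-- ===== PORT A =====
-- A's generator loop: keep the previously seen element `last`, emit (False, last) for each
-- further element, and finally (True, last).
def markLastLoopA (last : Int) : List Int → List (Bool × Int)
  | [] => [(true, last)]
  | v :: vs => (false, last) :: markLastLoopA v vs

def mark_last (it : List Int) : List (Bool × Int) :=
  match it with
  | [] => []                      -- next(it) raised StopIteration: yield nothing
  | x :: xs => markLastLoopA x xs

-- ===== PORT B =====
def mark_last_alt (it : List Int) : List (Bool × Int) :=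
  let n : Int := it.length
  (PySem.List.enumerate it 0).map (fun p => (decide (p.1 = n - 1), p.2))

-- ===== PRECONDITION & SPEC =====
def Spec_mark_last (it : List Int) (out : List (Bool × Int)) : Prop := out = mark_last_alt it
instance (it : List Int) (out : List (Bool × Int)) : Decidable (Spec_mark_last it out) := by unfold Spec_mark_last; infer_instance

-- ===== CLAIM (what is proved, stated in full; the proofs are below) =====
def Claim_equal_mark_last : Prop := ∀ (it : List Int), Dom_mark_last it → Spec_mark_last it (mark_last it)

-- ===== LEMMAS AND PROOFS =====
theorem markLastLoopA_eq_enumerate (rest : List Int) : ∀ (last : Int) (s n : Int),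
    n = s + rest.length →
    markLastLoopA last rest
      = (PySem.List.enumerate (last :: rest) s).map (fun p => (decide (p.1 = n), p.2)) := by
  induction rest with
  | nil =>
    intro last s n h
    simp [markLastLoopA, PySem.List.enumerate_cons, PySem.List.enumerate_nil, h]
  | cons v vs ih =>
    intro last s n h
    have hne : ¬ (s = n) := by simp [h]; omega
    simp only [markLastLoopA, PySem.List.enumerate_cons, List.map_cons, hne]
    refine congrArg (_ :: ·) ?_
    rw [ih v (s + 1) n (by simp [h]; ring)]
    simp [PySem.List.enumerate_cons]

-- ===== VERDICT (by name: the statement is the Claim_ definition above) =====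
theorem mark_last_spec : Claim_equal_mark_last := by
  intro it _
  unfold Spec_mark_last mark_last mark_last_alt
  cases it with
  | nil => simp [PySem.List.enumerate_nil]
  | cons x xs =>
    exact markLastLoopA_eq_enumerate xs x 0 ((x :: xs).length - 1) (by simp)
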